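-- pv_equiv track=rewrite | github.com/harinese/GDG_Bengaluru | GDG_Bengaluru/Backend/knowledge_cache.py | prune_chat_context
-- ===== SOURCE A (Python) =====
-- from typing import Optional, Dict, Any, List
--
-- MAX_CHAT_TURNS = 6  # Keep only last 6 messages (3 user + 3 bot)
--
-- def prune_chat_context(messages: List[dict]) -> List[dict]:
--     """
--     Keep only the last MAX_CHAT_TURNS messages.
--     If conversation is longer, prepend a compressed summary context.
--     """
--     if len(messages) <= MAX_CHAT_TURNS:
--         return messages
--
--     # Keep last N turns
--     recent = messages[-MAX_CHAT_TURNS:]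
--
--     # Build a micro-summary of older messages (just topics mentioned)
--     old_messages = messages[:-MAX_CHAT_TURNS]
--     topics = set()
--     for msg in old_messages:
--         text = msg.get("text", "").lower()
--         for keyword in ["rice", "wheat", "tomato", "blight", "pest", "irrigation",
--                          "fertilizer", "rain", "disease", "soil", "harvest"]:
--             if keyword in text:
--                 topics.add(keyword)
--
--     if topics:
--         summary = f"[Prior context: discussed {', '.join(sorted(topics))}]"
--         return [{"role": "user", "text": summary}, {"role": "model", "text": "Noted."}] + recent
--
--     return recent
-- ===== SOURCE B (Python) =====
-- from typing import Optional, Dict, Any, List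
--
-- MAX_CHAT_TURNS = 6  # Keep only last 6 messages (3 user + 3 bot)
--
-- # Keyword vocabulary pre-sorted alphabetically: filtering it in order yields the
-- # sorted topic list directly (no set, no runtime sort).
-- _SORTED_KEYWORDS = ["blight", "disease", "fertilizer", "harvest", "irrigation",
--                     "pest", "rain", "rice", "soil", "tomato", "wheat"]
--
-- def prune_chat_context(messages: List[dict]) -> List[dict]:
--     if len(messages) <= MAX_CHAT_TURNS:
--         return messages
--     # Join all older texts into ONE string; '\n' occurs in no keyword, so a
--     # keyword is in the combined string iff it is in some individual text.
--     combined = "\n".join(m.get("text", "").lower() for m in messages[:-MAX_CHAT_TURNS])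
--     topics = [kw for kw in _SORTED_KEYWORDS if kw in combined]
--     recent = messages[-MAX_CHAT_TURNS:]
--     if not topics:
--         return recent
--     summary = "[Prior context: discussed " + ", ".join(topics) + "]"
--     return [{"role": "user", "text": summary}, {"role": "model", "text": "Noted."}] + recent
-- ===== Notes on version B (the rewrite author's own statement) =====
-- stated objective: simpler
-- what changed: B joins all older texts into ONE newline-separated lowercased string and builds topics by filtering the pre-sorted constant keyword list against that single combined string, replacing A's per-message nested loop that accumulates a set and sorts it at the end; correct because '\n' occurs in no keyword, so a keyword is a substring of the joined string iff it is a substring of some individual text.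
import Mathlib
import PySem

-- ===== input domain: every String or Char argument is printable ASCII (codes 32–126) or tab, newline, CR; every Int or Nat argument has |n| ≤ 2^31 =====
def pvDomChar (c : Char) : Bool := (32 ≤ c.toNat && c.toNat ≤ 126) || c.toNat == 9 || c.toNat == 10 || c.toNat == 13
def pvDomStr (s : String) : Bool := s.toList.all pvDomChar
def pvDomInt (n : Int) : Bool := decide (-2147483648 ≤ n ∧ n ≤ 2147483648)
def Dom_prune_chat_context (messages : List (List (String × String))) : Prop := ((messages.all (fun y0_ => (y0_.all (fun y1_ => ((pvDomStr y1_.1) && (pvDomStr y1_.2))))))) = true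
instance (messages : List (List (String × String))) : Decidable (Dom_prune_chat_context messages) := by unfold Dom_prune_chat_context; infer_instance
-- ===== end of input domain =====

-- B joins all older texts into one '\n'-separated lowercased string and filters the
-- pre-sorted constant keyword list against it — no nested loop, no set, no runtime sort.

-- ===== PORT A =====
-- the keyword list, in A's literal order
def pvKeywordsA : List String :=
  ["rice", "wheat", "tomato", "blight", "pest", "irrigation",
   "fertilizer", "rain", "disease", "soil", "harvest"]

def prune_chat_context (messages : List (List (String × String))) : List (List (String × String)) :=
  if messages.length ≤ 6 then messages
  else
    let recent := PySem.List.slice messages (some (-6)) none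
    let old_messages := PySem.List.slice messages none (some (-6))
    let topics : PySem.Set String :=
      old_messages.foldl (fun s msg =>
        let text := PySem.Str.lower (PySem.Dict.getD (PySem.Dict.mk msg) "text" "")
        pvKeywordsA.foldl (fun s kw =>
          if PySem.Str.isIn kw text then PySem.Set.add s kw else s) s)
        PySem.Set.empty
    if topics ≠ [] then
      let summary := "[Prior context: discussed " ++
        PySem.Str.join ", " (PySem.List.sorted topics (fun x => x) false) ++ "]"
      [[("role", "user"), ("text", summary)], [("role", "model"), ("text", "Noted.")]] ++ recent
    else recent

-- ===== PORT B =====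
-- the keyword vocabulary pre-sorted alphabetically (a constant in Source B)
def pvSortedKeywords : List String :=
  ["blight", "disease", "fertilizer", "harvest", "irrigation",
   "pest", "rain", "rice", "soil", "tomato", "wheat"]

def prune_chat_context_alt (messages : List (List (String × String))) : List (List (String × String)) :=
  if messages.length ≤ 6 then messages
  else
    let combined := PySem.Str.join "\n"
      ((PySem.List.slice messages none (some (-6))).map
        (fun m => PySem.Str.lower (PySem.Dict.getD (PySem.Dict.mk m) "text" "")))
    let topics := pvSortedKeywords.filter (fun kw => PySem.Str.isIn kw combined)
    let recent := PySem.List.slice messages (some (-6)) none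
    if topics.isEmpty then recent
    else
      let summary := "[Prior context: discussed " ++ PySem.Str.join ", " topics ++ "]"
      [[("role", "user"), ("text", summary)], [("role", "model"), ("text", "Noted.")]] ++ recent

-- ===== PRECONDITION & SPEC =====
def Spec_prune_chat_context (messages : List (List (String × String))) (out : List (List (String × String))) : Prop := out = prune_chat_context_alt messages
instance (messages : List (List (String × String))) (out : List (List (String × String))) : Decidable (Spec_prune_chat_context messages out) := by unfold Spec_prune_chat_context; infer_instance

-- ===== CLAIM (what is proved, stated in full; the proofs are below) =====
def Claim_equal_prune_chat_context : Prop := ∀ (messages : List (List (String × String))), Dom_prune_chat_context messages → Spec_prune_chat_context messages (prune_chat_context messages)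

-- ===== LEMMAS AND PROOFS =====

-- a pattern not containing c sits inside an occurrence of `a ++ c :: b` on one side of c
theorem infix_append_cons_iff {α : Type} [DecidableEq α] (sub a b : List α) (c : α)
    (hc : c ∉ sub) : sub <:+: (a ++ c :: b) ↔ sub <:+: a ∨ sub <:+: b := by
  constructor
  · rintro ⟨p, q, h⟩
    rcases (Nat.lt_or_ge a.length (p.length + sub.length)).symm with hle | hgt
    · left
      have hpre : p ++ sub <+: a := by
        have h1 : p ++ sub <+: a ++ c :: b := ⟨q, by simpa using h⟩
        have h2 : a <+: a ++ c :: b := ⟨c :: b, rfl⟩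
        exact List.prefix_of_prefix_length_le h1 h2 (by simpa using hle)
      exact List.IsInfix.trans ⟨p, [], by simp⟩ hpre.isInfix
    · rcases (Nat.lt_or_ge p.length (a.length + 1)).symm with hge | hlt
      · right
        have hsuf : sub ++ q <:+ b := by
          have h1 : sub ++ q <:+ a ++ c :: b := ⟨p, by simpa using h⟩
          have h2 : b <:+ a ++ c :: b := ⟨a ++ [c], by simp⟩
          apply List.suffix_of_suffix_length_le h1 h2
          have hlen2 := congrArg List.length h
          simp at hlen2
          simp only [List.length_append]
          omega
        exact List.IsInfix.trans ⟨[], q, by simp⟩ hsuf.isInfix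
      · exfalso
        apply hc
        have hlen : (p ++ sub ++ q).length = (a ++ c :: b).length := by rw [h]
        simp at hlen
        have hidx : a.length < (p ++ sub ++ q).length := by simp; omega
        have e1 : (p ++ sub ++ q)[a.length]'hidx = (a ++ c :: b)[a.length]'(by simp) := by
          simp_rw [h]
        have e2 : (a ++ c :: b)[a.length]'(by simp) = c := by
          rw [List.getElem_append_right (by omega)]
          simp
        have e3 : (p ++ sub ++ q)[a.length]'hidx = sub[a.length - p.length]'(by omega) := by
          rw [List.getElem_append_left (bs := q) (by simp; omega),
              List.getElem_append_right (by omega)]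
        rw [e3, e2] at e1
        exact e1 ▸ List.getElem_mem _
  · rintro (⟨p, q, h⟩ | ⟨p, q, h⟩)
    · exact ⟨p, q ++ c :: b, by rw [← h]; simp⟩
    · exact ⟨a ++ c :: p, q, by rw [← h]; simp⟩

-- a nonempty '\n'-free pattern occurs in '\n'.join(parts) iff it occurs in some part
theorem isIn_join_newline (sub : List Char) (parts : List (List Char))
    (hne : sub ≠ []) (hc : '\n' ∉ sub) :
    PySem.Chars.isIn sub (PySem.Chars.join ['\n'] parts) = true ↔
      ∃ p ∈ parts, PySem.Chars.isIn sub p = true := by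
  induction parts with
  | nil =>
    simp only [PySem.Chars.join_nil, List.not_mem_nil]
    rw [PySem.Chars.isIn_iff_infix]
    simp [List.infix_nil, hne]
  | cons t rest ih =>
    cases rest with
    | nil =>
      simp [PySem.Chars.join_singleton]
    | cons t2 rest2 =>
      rw [PySem.Chars.join_cons_cons, PySem.Chars.isIn_iff_infix]
      have : t ++ ['\n'] ++ PySem.Chars.join ['\n'] (t2 :: rest2) =
          t ++ '\n' :: PySem.Chars.join ['\n'] (t2 :: rest2) := by simp
      rw [this, infix_append_cons_iff sub t _ '\n' hc,
          ← PySem.Chars.isIn_iff_infix, ← PySem.Chars.isIn_iff_infix, ih]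
      constructor
      · rintro (h | ⟨p, hp, hin⟩)
        · exact ⟨t, by simp, h⟩
        · exact ⟨p, List.mem_cons_of_mem _ hp, hin⟩
      · rintro ⟨p, hp, hin⟩
        rcases List.mem_cons.mp hp with rfl | hp
        · exact Or.inl hin
        · exact Or.inr ⟨p, hp, hin⟩

-- every keyword is nonempty and '\n'-free
theorem keywords_ok : ∀ kw ∈ pvSortedKeywords, kw.toList ≠ [] ∧ '\n' ∉ kw.toList := by decide

-- membership in the inner keyword-scan fold over one message's text
theorem mem_innerFold (text : String) (kws : List String) (s : PySem.Set String) (x : String) :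
    x ∈ kws.foldl (fun s kw => if PySem.Str.isIn kw text then PySem.Set.add s kw else s) s ↔
      x ∈ s ∨ (x ∈ kws ∧ PySem.Str.isIn x text = true) := by
  induction kws generalizing s with
  | nil => simp
  | cons k ks ih =>
    simp only [List.foldl_cons, List.mem_cons]
    by_cases h : PySem.Str.isIn k text = true
    · rw [if_pos h, ih]
      simp only [PySem.Set.mem_add]
      constructor
      · rintro ((hs | rfl) | hks)
        · exact Or.inl hs
        · exact Or.inr ⟨Or.inl rfl, h⟩
        · exact Or.inr ⟨Or.inr hks.1, hks.2⟩
      · rintro (hs | ⟨(rfl | hk), hin⟩)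
        · exact Or.inl (Or.inl hs)
        · exact Or.inl (Or.inr rfl)
        · exact Or.inr ⟨hk, hin⟩
    · rw [if_neg h, ih]
      constructor
      · rintro (hs | hks)
        · exact Or.inl hs
        · exact Or.inr ⟨Or.inr hks.1, hks.2⟩
      · rintro (hs | ⟨(rfl | hk), hin⟩)
        · exact Or.inl hs
        · exact absurd hin h
        · exact Or.inr ⟨hk, hin⟩

-- the inner fold preserves nodup
theorem nodup_innerFold (text : String) (kws : List String) (s : PySem.Set String) (h : s.Nodup) :
    (kws.foldl (fun s kw => if PySem.Str.isIn kw text then PySem.Set.add s kw else s) s).Nodup := by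
  induction kws generalizing s with
  | nil => exact h
  | cons k ks ih =>
    simp only [List.foldl_cons]
    split
    · exact ih _ (PySem.Set.nodup_add _ _ h)
    · exact ih _ h

-- membership in A's topics set over the whole old-message list
theorem mem_outerFold (msgs : List (List (String × String))) (s : PySem.Set String) (x : String) :
    x ∈ msgs.foldl (fun s msg =>
        pvKeywordsA.foldl (fun s kw =>
          if PySem.Str.isIn kw (PySem.Str.lower (PySem.Dict.getD (PySem.Dict.mk msg) "text" "")) then PySem.Set.add s kw else s) s) s ↔
      x ∈ s ∨ (x ∈ pvKeywordsA ∧ ∃ m ∈ msgs, PySem.Str.isIn x (PySem.Str.lower (PySem.Dict.getD (PySem.Dict.mk m) "text" "")) = true) := by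
  induction msgs generalizing s with
  | nil => simp
  | cons m ms ih =>
    simp only [List.foldl_cons, ih, mem_innerFold, List.mem_cons]
    constructor
    · rintro ((hs | ⟨hk, hin⟩) | ⟨hk, mm, hmm, hin⟩)
      · exact Or.inl hs
      · exact Or.inr ⟨hk, m, Or.inl rfl, hin⟩
      · exact Or.inr ⟨hk, mm, Or.inr hmm, hin⟩
    · rintro (hs | ⟨hk, mm, (rfl | hmm), hin⟩)
      · exact Or.inl (Or.inl hs)
      · exact Or.inl (Or.inr ⟨hk, hin⟩)
      · exact Or.inr ⟨hk, mm, hmm, hin⟩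

theorem nodup_outerFold (msgs : List (List (String × String))) (s : PySem.Set String) (h : s.Nodup) :
    (msgs.foldl (fun s msg =>
        pvKeywordsA.foldl (fun s kw =>
          if PySem.Str.isIn kw (PySem.Str.lower (PySem.Dict.getD (PySem.Dict.mk msg) "text" "")) then PySem.Set.add s kw else s) s) s).Nodup := by
  induction msgs generalizing s with
  | nil => exact h
  | cons m ms ih => exact ih _ (nodup_innerFold _ _ _ h)

-- keyword list facts
theorem perm_keywords : pvKeywordsA.Perm pvSortedKeywords := by decide

theorem pairwise_lt_sortedKeywords : List.Pairwise (· < ·) pvSortedKeywords := by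
  simp only [pvSortedKeywords, List.pairwise_cons, List.mem_cons, List.not_mem_nil]
  refine ⟨?_, ?_, ?_, ?_, ?_, ?_, ?_, ?_, ?_, ?_, ?_, List.Pairwise.nil⟩ <;>
  · intro y hy
    rcases hy with rfl|rfl|rfl|rfl|rfl|rfl|rfl|rfl|rfl|rfl|h <;>
      first
        | exact absurd h (by simp)
        | exact String.lt_iff_toList_lt.mpr (of_decide_eq_true (by decide))

-- B's filter test over the combined string ↔ occurrence in some old message's text
theorem filter_test_iff (kw : String) (hkw : kw ∈ pvSortedKeywords)
    (msgs : List (List (String × String))) :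
    PySem.Str.isIn kw (PySem.Str.join "\n"
      (msgs.map (fun m => PySem.Str.lower (PySem.Dict.getD (PySem.Dict.mk m) "text" "")))) = true ↔
    ∃ m ∈ msgs, PySem.Str.isIn kw (PySem.Str.lower (PySem.Dict.getD (PySem.Dict.mk m) "text" "")) = true := by
  obtain ⟨hne, hc⟩ := keywords_ok kw hkw
  rw [PySem.Str.isIn_eq, PySem.Str.toList_join]
  have : ((msgs.map (fun m => PySem.Str.lower (PySem.Dict.getD (PySem.Dict.mk m) "text" ""))).map String.toList) =
      msgs.map (fun m => (PySem.Str.lower (PySem.Dict.getD (PySem.Dict.mk m) "text" "")).toList) := by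
    simp [List.map_map]
  rw [this]
  have hsep : ("\n" : String).toList = ['\n'] := by decide
  rw [hsep, isIn_join_newline kw.toList _ hne hc]
  constructor
  · rintro ⟨p, hp, hin⟩
    rcases List.mem_map.mp hp with ⟨m, hm, rfl⟩
    exact ⟨m, hm, by rw [PySem.Str.isIn_eq]; exact hin⟩
  · rintro ⟨m, hm, hin⟩
    exact ⟨_, List.mem_map_of_mem hm, by rw [PySem.Str.isIn_eq] at hin; exact hin⟩

-- A's sorted topics = B's filtered sorted keyword list
theorem sorted_topics_eq (msgs : List (List (String × String))) :
    PySem.List.sorted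
      (msgs.foldl (fun s msg =>
        pvKeywordsA.foldl (fun s kw =>
          if PySem.Str.isIn kw (PySem.Str.lower (PySem.Dict.getD (PySem.Dict.mk msg) "text" "")) then PySem.Set.add s kw else s) s)
        PySem.Set.empty)
      (fun x => x) false =
    pvSortedKeywords.filter (fun kw =>
      PySem.Str.isIn kw (PySem.Str.join "\n"
        (msgs.map (fun m => PySem.Str.lower (PySem.Dict.getD (PySem.Dict.mk m) "text" ""))))) := by
  apply PySem.List.sorted_id_eq_of_perm_of_pairwise
  · apply (List.perm_ext_iff_of_nodup
      ((List.Pairwise.filter _ pairwise_lt_sortedKeywords).imp ne_of_lt)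
      (nodup_outerFold _ _ (by simp [PySem.Set.empty]))).mpr
    intro x
    rw [Iff.comm]
    simp only [mem_outerFold, PySem.Set.empty, List.not_mem_nil, false_or, List.mem_filter]
    constructor
    · rintro ⟨hx, hex⟩
      exact ⟨perm_keywords.mem_iff.mp hx,
        (filter_test_iff x (perm_keywords.mem_iff.mp hx) msgs).mpr hex⟩
    · rintro ⟨hx, hin⟩
      exact ⟨perm_keywords.mem_iff.mpr hx, (filter_test_iff x hx msgs).mp hin⟩
  · exact (List.Pairwise.filter _ pairwise_lt_sortedKeywords).imp le_of_lt

-- ===== VERDICT (by name: the statement is the Claim_ definition above) =====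
theorem prune_chat_context_spec : Claim_equal_prune_chat_context := by
  intro messages _
  unfold Spec_prune_chat_context prune_chat_context prune_chat_context_alt
  by_cases hlen : messages.length ≤ 6
  · simp [hlen]
  · simp only [hlen, if_false]
    have hkey := sorted_topics_eq (PySem.List.slice messages none (some (-6)))
    set topicsA := (PySem.List.slice messages none (some (-6))).foldl (fun s msg =>
        pvKeywordsA.foldl (fun s kw =>
          if PySem.Str.isIn kw (PySem.Str.lower (PySem.Dict.getD (PySem.Dict.mk msg) "text" "")) then PySem.Set.add s kw else s) s)
        PySem.Set.empty with htA
    set topicsB := pvSortedKeywords.filter (fun kw =>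
      PySem.Str.isIn kw (PySem.Str.join "\n"
        ((PySem.List.slice messages none (some (-6))).map
          (fun m => PySem.Str.lower (PySem.Dict.getD (PySem.Dict.mk m) "text" ""))))) with htB
    have hperm : (PySem.List.sorted topicsA (fun x => x) false).Perm topicsA :=
      PySem.List.sorted_perm _ _ _
    by_cases hne : topicsA = []
    · have hB : topicsB = [] := by
        rw [← hkey, hne]
        exact List.Perm.eq_nil (hne ▸ hperm)
      simp [hne, hB]
    · have hB : topicsB ≠ [] := by
        intro h
        rw [← hkey] at h
        exact hne (List.Perm.eq_nil (h ▸ hperm).symm)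
      simp only [ne_eq, hne, not_false_iff, if_true, List.isEmpty_iff, hB, if_false, hkey]
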